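-- pv_equiv track=rewrite | github.com/Jerenyaoyelu/Python-Programming---COMP9021 | midterm-sample/OneDrive-2018-09-03 (1)/MIdterm/FinalPrep/exercise_8.py | is_heterosquare
-- ===== SOURCE A (Python) =====
-- def is_heterosquare(square):
--     '''
--     A heterosquare of order n is an arrangement of the integers 1 to n**2 in a square,
--     such that the rows, columns, and diagonals all sum to DIFFERENT values.
--     In contrast, magic squares have all these sums equal.
--
--
--     >>> is_heterosquare([[1, 2, 3],\
--                          [8, 9, 4],\
--                          [7, 6, 5]])
--     True
--     >>> is_heterosquare([[1, 2, 3],\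
--                          [9, 8, 4],\
--                          [7, 6, 5]])
--     False
--     >>> is_heterosquare([[2, 1, 3, 4],\
--                          [5, 6, 7, 8],\
--                          [9, 10, 11, 12],\
--                          [13, 14, 15, 16]])
--     True
--     >>> is_heterosquare([[1, 2, 3, 4],\
--                          [5, 6, 7, 8],\
--                          [9, 10, 11, 12],\
--                          [13, 14, 15, 16]])
--     False
--     '''
--     n = len(square)
--     if any(len(line) != n for line in square):
--         return False
--
--     sums = set()
--     for row in square:
--         if sum(row) in sums:
--             return False
--         sums.add(sum(row))
--
--     cols = get_column_lists(square)
--     for col in cols: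
--         if sum(col) in sums:
--             return False
--         sums.add(sum(col))
--
--     first, second = get_diag(square)
--     if sum(first) in sums:
--         return False
--     sums.add(sum(first))
--
--     if sum(second) in sums:
--         return False
--     sums.add(sum(second))
--     return True
--
-- def get_diag(square):
--     n = len(square)
--     first_diag = []
--     for i in range(n):
--         first_diag.append(square[i][i])
--
--     second_diag = []
--     for i in range(n-1,-1,-1):
--         second_diag.append(square[n-i-1][i])
--     return first_diag, second_diag
--
-- def get_column_lists(square):
--     n = len(square)
--     columns = []
--     for i in range(n):
--         cols = []
--         for j in square:
--             cols.append(j[i])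
--         columns.append(cols)
--     return columns
-- ===== SOURCE B (Python) =====
-- def is_heterosquare(square):
--     n = len(square)
--     row_sums = []
--     col = [0] * n
--     d1 = d2 = 0
--     for i, r in enumerate(square):
--         if len(r) != n:
--             return False
--         row_sums.append(sum(r))
--         col = [c + v for c, v in zip(col, r)]
--         d1 += r[i]
--         d2 += r[n - 1 - i]
--     sums = sorted(row_sums + col + [d1, d2])
--     return all(x != y for x, y in zip(sums, sums[1:]))
-- ===== Notes on version B (the rewrite author's own statement) =====
-- stated objective: alternative
-- what changed: Single fold over the rows maintaining a running column-sum vector, the two diagonal sums and the row sums (no transpose/column-list or diagonal-list construction and no set at all), then distinctness by sorting the 2n+2 sums and comparing adjacent elements, replacing A's staged helper passes with an incrementally grown membership-tested set.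
import Mathlib
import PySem

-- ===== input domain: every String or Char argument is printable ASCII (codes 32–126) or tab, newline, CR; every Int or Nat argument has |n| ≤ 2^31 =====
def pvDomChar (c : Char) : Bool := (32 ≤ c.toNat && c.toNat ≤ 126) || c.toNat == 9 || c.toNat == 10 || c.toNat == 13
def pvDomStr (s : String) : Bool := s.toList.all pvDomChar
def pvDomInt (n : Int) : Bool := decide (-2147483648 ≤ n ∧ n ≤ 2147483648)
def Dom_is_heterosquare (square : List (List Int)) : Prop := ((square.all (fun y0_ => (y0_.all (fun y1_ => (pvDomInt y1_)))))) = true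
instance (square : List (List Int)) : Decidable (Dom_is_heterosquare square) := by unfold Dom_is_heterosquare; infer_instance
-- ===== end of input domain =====

-- B replaces A's staged passes (column lists, diagonal lists, incrementally grown
-- membership-tested set) by ONE fold over the rows maintaining a running column-sum
-- vector, the two diagonal sums and the row sums, then checks distinctness by
-- SORTING the 2n+2 sums and comparing adjacent elements (no set anywhere).

-- ===== PORT A =====
-- helper: 'for i in range(n): first_diag.append(square[i][i])' and the countdown twin
-- (indices are in range on every executed path: get_diag is only called after the ragged guard).
def get_diag (square : List (List Int)) : List Int × List Int :=
  let n := square.length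
  let first := (List.range n).foldl (fun acc i => acc ++ [(square.getD i []).getD i 0]) []
  -- range(n-1, -1, -1) visits i = n-1, …, 0, appending square[n-i-1][i]
  let second := ((List.range n).reverse).foldl (fun acc i => acc ++ [(square.getD (n - 1 - i) []).getD i 0]) []
  (first, second)

def get_column_lists (square : List (List Int)) : List (List Int) :=
  let n := square.length
  (List.range n).foldl (fun columns i => columns ++ [square.foldl (fun cols j => cols ++ [j.getD i 0]) []]) []

-- the shared shape of A's 'if sum(line) in sums: return False; sums.add(sum(line))' loops
def pvScanSums (lines : List (List Int)) (sums : PySem.Set Int) : Option (PySem.Set Int) :=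
  match lines with
  | [] => some sums
  | line :: rest =>
    if PySem.Set.contains sums line.sum then none
    else pvScanSums rest (PySem.Set.add sums line.sum)

def is_heterosquare (square : List (List Int)) : Bool :=
  let n := square.length
  if square.any (fun line => line.length ≠ n) then false
  else
    match pvScanSums square PySem.Set.empty with
    | none => false
    | some sums =>
      match pvScanSums (get_column_lists square) sums with
      | none => false
      | some sums =>
        let d := get_diag square
        if PySem.Set.contains sums d.1.sum then false
        else
          let sums := PySem.Set.add sums d.1.sum
          if PySem.Set.contains sums d.2.sum then false
          else true

-- ===== PORT B =====
-- B's single 'for i, r in enumerate(square)' loop: early-exits (none) on a ragged row,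
-- otherwise appends sum(r) to row_sums, vector-adds r into col, and accumulates the
-- two diagonal entries r[i] and r[n-1-i] (in range on every executed path, hence getD).
def pvBLoop (n : Nat) : List (List Int) → Nat → List Int → List Int → Int → Int →
    Option (List Int × List Int × Int × Int)
  | [], _, rowSums, col, d1, d2 => some (rowSums, col, d1, d2)
  | r :: rest, i, rowSums, col, d1, d2 =>
    if r.length ≠ n then none
    else pvBLoop n rest (i + 1) (rowSums ++ [r.sum]) (List.zipWith (· + ·) col r)
           (d1 + r.getD i 0) (d2 + r.getD (n - 1 - i) 0)

def is_heterosquare_alt (square : List (List Int)) : Bool :=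
  let n := square.length
  match pvBLoop n square 0 [] (List.replicate n 0) 0 0 with
  | none => false
  | some (rowSums, col, d1, d2) =>
    let sums := PySem.List.sorted (rowSums ++ col ++ [d1, d2]) (fun x => x) false
    (sums.zip sums.tail).all (fun p => p.1 != p.2)

-- ===== PRECONDITION & SPEC =====
def Spec_is_heterosquare (square : List (List Int)) (out : Bool) : Prop := out = is_heterosquare_alt square
instance (square : List (List Int)) (out : Bool) : Decidable (Spec_is_heterosquare square out) := by unfold Spec_is_heterosquare; infer_instance

-- ===== CLAIM (what is proved, stated in full; the proofs are below) =====
def Claim_equal_is_heterosquare : Prop := ∀ (square : List (List Int)), Dom_is_heterosquare square → Spec_is_heterosquare square (is_heterosquare square)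

-- ===== LEMMAS AND PROOFS =====

-- A's scan-and-add loop succeeds exactly when the accumulated list stays duplicate-free,
-- and then the set is the old set with the new sums appended.
lemma pvScanSums_eq (lines : List (List Int)) (s : PySem.Set Int) (hs : s.Nodup) :
    pvScanSums lines s =
      if (s ++ lines.map (fun line => line.sum)).Nodup
      then some (s ++ lines.map (fun line => line.sum)) else none := by
  induction lines generalizing s with
  | nil => simp [pvScanSums, hs]
  | cons line rest ih =>
    by_cases hmem : line.sum ∈ s
    · have hnot : ¬ (s ++ line.sum :: rest.map (fun line => line.sum)).Nodup := by
        intro hnd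
        exact List.disjoint_of_nodup_append hnd hmem (by simp)
      have hc := (PySem.Set.contains_iff s line.sum).2 hmem
      simp only [pvScanSums, hc, if_true, List.map_cons]
      rw [if_neg hnot]
    · have hadd : PySem.Set.add s line.sum = s ++ [line.sum] := PySem.Set.add_of_not_mem hmem
      have hnd' : (s ++ [line.sum]).Nodup := by
        simp [List.nodup_append, hs]
        exact fun a ha e => hmem (e ▸ ha)
      have hcont : ¬ PySem.Set.contains s line.sum = true := by
        rw [PySem.Set.contains_iff]; exact hmem
      simp only [pvScanSums, if_neg hcont, hadd, ih _ hnd']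
      simp [List.append_assoc]

-- A's countdown-built second diagonal equals the forward-built one, elementwise
lemma second_diag_eq (square : List (List Int)) :
    ((List.range square.length).reverse).map
        (fun i => (square.getD (square.length - 1 - i) []).getD i 0)
      = (List.range square.length).map
        (fun i => (square.getD i []).getD (square.length - 1 - i) 0) := by
  apply List.ext_getElem
  · simp
  · intro k h1 h2
    simp only [List.getElem_map, List.getElem_reverse,
      List.length_range, List.getElem_range] at *
    have hk : k < square.length := by simpa using h2
    congr 2 <;> omega

-- A's final two membership checks are the distinctness of the set extended by both diagonals
lemma final_checks_eq (s : PySem.Set Int) (hs : s.Nodup) (d1 d2 : Int) :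
    (if PySem.Set.contains s d1 then false
     else if PySem.Set.contains (PySem.Set.add s d1) d2 then false else true)
      = decide ((s ++ [d1, d2]).Nodup) := by
  have hiff : (s ++ [d1, d2]).Nodup ↔ d1 ∉ s ∧ d2 ∉ s ∧ d1 ≠ d2 := by
    simp [List.nodup_append, hs]
    constructor
    · rintro ⟨hd, hall⟩
      exact ⟨fun h => (hall d1 h).1 rfl, fun h => (hall d2 h).2 rfl, hd⟩
    · rintro ⟨h1, h2, hd⟩
      exact ⟨hd, fun a ha => ⟨fun e => h1 (e ▸ ha), fun e => h2 (e ▸ ha)⟩⟩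
  by_cases h1 : d1 ∈ s
  · have hnot : ¬ (s ++ [d1, d2]).Nodup := fun h => (hiff.1 h).1 h1
    simp only [(PySem.Set.contains_iff s d1).2 h1, if_true, decide_eq_false hnot]
  · have hadd : PySem.Set.add s d1 = s ++ [d1] := PySem.Set.add_of_not_mem h1
    have hc1 : s.contains d1 = false := by
      rw [← Bool.not_eq_true, PySem.Set.contains_iff]; exact h1
    by_cases h2 : d2 ∈ s ∨ d2 = d1
    · have hc2 : (PySem.Set.add s d1).contains d2 = true := by
        rw [hadd, PySem.Set.contains_iff]
        rcases h2 with h | h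
        · exact List.mem_append.2 (Or.inl h)
        · simp [h]
      have hnot : ¬ (s ++ [d1, d2]).Nodup := by
        intro h
        rcases hiff.1 h with ⟨a1, a2, a3⟩
        rcases h2 with h | h
        · exact a2 h
        · exact a3 h.symm
      simp only [hc1, hc2, Bool.false_eq_true, if_false, if_true, decide_eq_false hnot]
    · rw [not_or] at h2
      have hc2 : (PySem.Set.add s d1).contains d2 = false := by
        rw [hadd, ← Bool.not_eq_true, PySem.Set.contains_iff]
        simp [h2.1, h2.2]
      have hnd : (s ++ [d1, d2]).Nodup := hiff.2 ⟨h1, h2.1, fun e => h2.2 e.symm⟩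
      simp only [hc1, hc2, Bool.false_eq_true, if_false, decide_eq_true hnd]

-- the three phases of A (rows, columns, diagonals) amount to one distinctness check
lemma phases_eq (sq C2 : List (List Int)) (d1 d2 : Int) :
    (match pvScanSums sq PySem.Set.empty with
     | none => false
     | some sums =>
       match pvScanSums C2 sums with
       | none => false
       | some sums =>
         if PySem.Set.contains sums d1 then false
         else if PySem.Set.contains (PySem.Set.add sums d1) d2 then false else true)
    = decide ((sq.map (fun line => line.sum) ++ C2.map (fun line => line.sum) ++ [d1, d2]).Nodup) := by
  rw [show (PySem.Set.empty : PySem.Set Int) = [] from rfl]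
  rw [pvScanSums_eq sq [] (by simp)]
  simp only [List.nil_append]
  by_cases h1 : (sq.map (fun line => line.sum)).Nodup
  · rw [if_pos h1]
    show (match pvScanSums C2 (sq.map (fun line => line.sum)) with
          | none => false
          | some sums =>
            if PySem.Set.contains sums d1 then false
            else if PySem.Set.contains (PySem.Set.add sums d1) d2 then false else true)
        = decide ((sq.map (fun line => line.sum) ++ C2.map (fun line => line.sum) ++ [d1, d2]).Nodup)
    rw [pvScanSums_eq C2 _ h1]
    by_cases h2 : (sq.map (fun line => line.sum) ++ C2.map (fun line => line.sum)).Nodup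
    · rw [if_pos h2]
      exact final_checks_eq _ h2 d1 d2
    · rw [if_neg h2, decide_eq_false (fun hnd => h2 (List.Nodup.of_append_left hnd))]
  · rw [if_neg h1, decide_eq_false (fun hnd => h1 ((List.Nodup.of_append_left hnd).of_append_left))]

-- B's loop hits the ragged-row early exit exactly when some row has the wrong length
lemma pvBLoop_none (n : Nat) (rows : List (List Int)) :
    ∀ i rowSums col d1 d2, (∃ r ∈ rows, r.length ≠ n) →
    pvBLoop n rows i rowSums col d1 d2 = none := by
  induction rows with
  | nil => rintro _ _ _ _ _ ⟨r, hr, -⟩; exact absurd hr (List.not_mem_nil)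
  | cons r rest ih =>
    rintro i rowSums col d1 d2 ⟨q, hq, hqn⟩
    by_cases hr : r.length ≠ n
    · simp [pvBLoop, hr]
    · rcases List.mem_cons.1 hq with rfl | hq'
      · exact absurd hqn hr
      · simp only [pvBLoop, if_neg hr]
        exact ih _ _ _ _ _ ⟨q, hq', hqn⟩

-- running column-sum vector: folding zipWith (+) over equal-length rows is columnwise sums
lemma foldl_zipWith_eq (n : Nat) (rows : List (List Int)) :
    ∀ col : List Int, col.length = n → (∀ r ∈ rows, r.length = n) →
    rows.foldl (fun c r => List.zipWith (· + ·) c r) col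
      = (List.range n).map (fun j => col.getD j 0 + (rows.map (fun r => r.getD j 0)).sum) := by
  induction rows with
  | nil =>
    intro col hcol _
    simp only [List.foldl_nil, List.map_nil, List.sum_nil, add_zero]
    apply List.ext_getElem
    · simp [hcol]
    · intro k h1 h2
      simp only [List.getElem_map, List.getElem_range]
      rw [List.getD_eq_getElem col 0 (by omega)]
  | cons r rest ih =>
    intro col hcol hlen
    have hr : r.length = n := hlen r (by simp)
    have hz : (List.zipWith (· + ·) col r).length = n := by simp [hcol, hr]
    rw [List.foldl_cons, ih _ hz (fun q hq => hlen q (by simp [hq]))]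
    apply List.map_congr_left
    intro j hj
    have hjn : j < n := List.mem_range.1 hj
    simp only [List.map_cons, List.sum_cons]
    rw [List.getD_eq_getElem _ 0 (by omega), List.getElem_zipWith,
      List.getD_eq_getElem col 0 (by omega), List.getD_eq_getElem r 0 (by omega)]
    ring

-- B's loop on a well-shaped square: row sums appended, columns vector-added, diagonals accumulated
lemma pvBLoop_ok (n : Nat) (rows : List (List Int)) :
    ∀ (i : Nat) rowSums col d1 d2, (∀ r ∈ rows, r.length = n) →
    pvBLoop n rows i rowSums col d1 d2
      = some (rowSums ++ rows.map (fun r => r.sum),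
              rows.foldl (fun c r => List.zipWith (· + ·) c r) col,
              d1 + ((List.range rows.length).map (fun k => (rows.getD k []).getD (i + k) 0)).sum,
              d2 + ((List.range rows.length).map (fun k => (rows.getD k []).getD (n - 1 - (i + k)) 0)).sum) := by
  induction rows with
  | nil => intro i rowSums col d1 d2 _; simp [pvBLoop]
  | cons r rest ih =>
    intro i rowSums col d1 d2 hlen
    have hr : ¬ r.length ≠ n := by simpa using hlen r (by simp)
    rw [pvBLoop, if_neg hr, ih (i + 1) _ _ _ _ (fun q hq => hlen q (by simp [hq]))]
    have hik : ∀ k : Nat, i + 1 + k = i + (k + 1) := fun k => by omega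
    simp only [List.length_cons, List.range_succ_eq_map, List.map_cons, List.sum_cons,
      List.map_map, List.foldl_cons, List.append_assoc, List.singleton_append,
      Function.comp_def, Nat.succ_eq_add_one, List.getD_cons_succ, List.getD_cons_zero,
      hik, Nat.add_zero, add_assoc]

-- adjacent all-different over zip with the tail is the chain of ≠ on adjacent elements
lemma all_zip_tail_ne : ∀ (S : List Int),
    (((S.zip S.tail).all (fun p => p.1 != p.2)) = true ↔ S.IsChain (· ≠ ·))
  | [] => by simp
  | [a] => by simp
  | a :: b :: u => by
    have ih := all_zip_tail_ne (b :: u)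
    simp only [List.tail_cons, List.zip_cons_cons, List.all_cons, Bool.and_eq_true,
      bne_iff_ne, ne_eq] at ih ⊢
    rw [List.isChain_cons_cons, ih]

-- adjacent ≠ plus adjacent ≤ is adjacent <
lemma isChain_lt_of_ne_le : ∀ (S : List Int),
    S.IsChain (· ≠ ·) → S.IsChain (· ≤ ·) → S.IsChain (· < ·)
  | [] => fun _ _ => List.isChain_nil
  | [a] => fun _ _ => List.isChain_singleton a
  | a :: b :: u => fun h1 h2 => by
    rw [List.isChain_cons_cons] at h1 h2 ⊢
    exact ⟨lt_of_le_of_ne h2.1 h1.1, isChain_lt_of_ne_le (b :: u) h1.2 h2.2⟩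

-- adjacent distinctness of the sorted list is distinctness of the original list
lemma sorted_adj_ne_eq_nodup (L : List Int) :
    (((PySem.List.sorted L (fun x => x) false).zip
        (PySem.List.sorted L (fun x => x) false).tail).all (fun p => p.1 != p.2))
      = decide L.Nodup := by
  set S := PySem.List.sorted L (fun x => x) false with hS
  have hperm : S.Perm L := PySem.List.sorted_perm L (fun x => x) false
  have hpw : S.Pairwise (fun a b => a ≤ b) := PySem.List.sorted_pairwise L (fun x => x)
  have key : ((S.zip S.tail).all (fun p => p.1 != p.2)) = true ↔ L.Nodup := by
    rw [all_zip_tail_ne]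
    constructor
    · intro hch
      rw [← hperm.nodup_iff]
      have hlt : S.IsChain (· < ·) := isChain_lt_of_ne_le S hch (hpw.isChain)
      exact ((List.isChain_iff_pairwise).1 hlt).imp (fun h => ne_of_lt h)
    · intro hnd
      have hndS : S.Nodup := (hperm.nodup_iff).2 hnd
      have hlt : S.Pairwise (· < ·) :=
        (hndS.and hpw).imp (fun h => lt_of_le_of_ne h.2 h.1)
      exact hlt.isChain.imp (fun _ _ hab => ne_of_lt hab)
  cases hb : ((S.zip S.tail).all (fun p => p.1 != p.2)) with
  | true => rw [decide_eq_true (key.mp hb)]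
  | false =>
    rw [decide_eq_false (fun hnd => by rw [key.mpr hnd] at hb; cases hb)]

-- ===== VERDICT (by name: the statement is the Claim_ definition above) =====
theorem is_heterosquare_spec : Claim_equal_is_heterosquare := by
  intro square _
  unfold Spec_is_heterosquare
  by_cases hr : square.any (fun line => line.length ≠ square.length)
  · rcases List.any_eq_true.1 hr with ⟨q, hq, hqn⟩
    simp only [is_heterosquare, is_heterosquare_alt, hr, if_true,
      pvBLoop_none square.length square 0 [] (List.replicate square.length 0) 0 0
        ⟨q, hq, by simpa using hqn⟩]
  · have hsq : ∀ r ∈ square, r.length = square.length := by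
      intro r h
      by_contra hc
      exact hr (List.any_eq_true.2 ⟨r, h, by simpa using hc⟩)
    simp only [is_heterosquare, is_heterosquare_alt, hr, get_diag, get_column_lists,
      PySem.List.foldl_append_singleton_eq_map, List.nil_append,
      pvBLoop_ok square.length square 0 [] (List.replicate square.length 0) 0 0 hsq,
      foldl_zipWith_eq square.length square (List.replicate square.length 0) (by simp) hsq,
      second_diag_eq]
    rw [phases_eq, sorted_adj_ne_eq_nodup]
    simp [List.map_map, Function.comp_def]
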